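-- pv_equiv track=rewrite | github.com/Haksell/codeforces | problems/1851C.py | solve
-- ===== SOURCE A (Python) =====
-- def solve(a, k):
--     if k == 1:
--         return True
--     first, *a, last = a
--     if first == last:
--         return a.count(first) >= k - 2
--     target = first
--     remaining = k - 1
--     for ai in a:
--         if ai != target:
--             continue
--         remaining -= 1
--         if remaining == 0:
--             if target == last:
--                 return True
--             target = last
--             remaining = k - 1
--     return False
-- ===== SOURCE B (Python) =====
-- def solve(a, k):
--     if k == 1:
--         return True
--     first, *a, last = a
--     if first == last:
--         return a.count(first) >= k - 2
--     fs = [i for i, x in enumerate(a) if x == first]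
--     if k < 2 or len(fs) < k - 1:
--         return False
--     p = fs[k - 2]
--     return sum(1 for i, x in enumerate(a) if x == last and i > p) >= k - 1
-- ===== Notes on version B (the rewrite author's own statement) =====
-- stated objective: alternative
-- what changed: Replaces A's one-pass greedy state machine (target/remaining with early exit) in the first!=last case by building the index list of occurrences of `first`, picking the (k-1)-th such position, and counting occurrences of `last` strictly after it.
import Mathlib
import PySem

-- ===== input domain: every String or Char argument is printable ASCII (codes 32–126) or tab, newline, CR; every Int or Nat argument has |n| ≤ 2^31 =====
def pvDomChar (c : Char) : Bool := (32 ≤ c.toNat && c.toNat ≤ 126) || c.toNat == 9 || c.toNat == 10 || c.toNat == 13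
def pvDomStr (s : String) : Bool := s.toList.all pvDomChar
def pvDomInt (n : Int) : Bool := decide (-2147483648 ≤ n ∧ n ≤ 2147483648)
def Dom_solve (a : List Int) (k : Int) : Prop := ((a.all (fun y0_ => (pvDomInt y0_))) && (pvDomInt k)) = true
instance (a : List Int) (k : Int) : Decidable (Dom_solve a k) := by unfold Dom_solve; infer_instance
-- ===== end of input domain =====

-- B replaces A's one-pass greedy state machine by explicit index tables (positions of `first`,
-- then a positional count of `last` after the (k-1)-th `first`); objective: alternative, same O(n).


-- ===== PORT A =====
-- A's for-loop over the middle segment, with state (target, remaining).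
def solveLoop (last k : Int) : List Int → Int → Int → Bool
  | [], _, _ => false
  | ai :: rest, target, remaining =>
    if ai = target then
      if remaining - 1 = 0 then
        if target = last then true
        else solveLoop last k rest last (k - 1)
      else solveLoop last k rest target (remaining - 1)
    else solveLoop last k rest target remaining

def solve (a : List Int) (k : Int) : Bool :=
  if k = 1 then true
  else
    match a with
    | [] => false          -- Python raises here (excluded by Pre_solve)
    | first :: rest =>
      match rest.getLast? with
      | none => false      -- Python raises here (excluded by Pre_solve)
      | some last =>
        let mid := rest.dropLast
        if first = last then decide ((mid.count first : Int) ≥ k - 2)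
        else solveLoop last k mid first (k - 1)

-- ===== PORT B =====
def solve_alt (a : List Int) (k : Int) : Bool :=
  if k = 1 then true
  else
    match a with
    | [] => false          -- Python raises here (excluded by Pre_solve)
    | first :: rest =>
      match rest.getLast? with
      | none => false      -- Python raises here (excluded by Pre_solve)
      | some last =>
        let mid := rest.dropLast
        if first = last then decide ((mid.count first : Int) ≥ k - 2)
        else
          -- fs = [i for i, x in enumerate(a) if x == first]
          let fs := (PySem.List.enumerate mid 0).filterMap
            (fun ix => if ix.2 = first then some ix.1 else none)
          if k < 2 ∨ (fs.length : Int) < k - 1 then false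
          else
            match PySem.List.pyGet? fs (k - 2) with    -- p = fs[k-2]
            | none => false  -- unreachable: guard above puts k-2 in range
            | some p =>
              -- sum(1 for i, x in enumerate(a) if x == last and i > p) >= k - 1
              decide (k - 1 ≤ (((PySem.List.enumerate mid 0).countP
                (fun ix => decide (ix.2 = last ∧ p < ix.1))) : Int))

-- ===== PRECONDITION & SPEC =====
-- Pre_ excludes k ≠ 1 with fewer than two elements, where `first, *a, last = a` raises ValueError in both programs.
def Pre_solve (a : List Int) (k : Int) : Prop := k = 1 ∨ 2 ≤ a.length
instance (a : List Int) (k : Int) : Decidable (Pre_solve a k) := by unfold Pre_solve; infer_instance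
def pvWitness_solve : List Int × Int := ([1, 2, 1], 2)

def Spec_solve (a : List Int) (k : Int) (out : Bool) : Prop := out = solve_alt a k
instance (a : List Int) (k : Int) (out : Bool) : Decidable (Spec_solve a k out) := by unfold Spec_solve; infer_instance

-- ===== CLAIM (what is proved, stated in full; the proofs are below) =====
def Claim_equal_solve : Prop := ∀ (a : List Int) (k : Int), Dom_solve a k → Pre_solve a k → Spec_solve a k (solve a k)

-- ===== LEMMAS AND PROOFS =====

-- suffix of l after the (n+1)-th occurrence of t
def afterNth (t : Int) : List Int → Nat → Option (List Int)
  | [], _ => none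
  | x :: xs, n =>
    if x = t then
      match n with
      | 0 => some xs
      | m + 1 => afterNth t xs m
    else afterNth t xs n

-- A's loop never fires the remaining=0 branch when remaining starts ≤ 0
theorem solveLoop_nonpos (last k : Int) (l : List Int) (t r : Int) (hr : r ≤ 0) :
    solveLoop last k l t r = false := by
  induction l generalizing t r with
  | nil => rfl
  | cons x xs ih =>
    simp only [solveLoop]
    split_ifs with h1 h2 h3
    · omega
    · exact ih _ _ (by omega)
    · exact ih _ _ (by omega)
    · exact ih _ _ hr

-- phase 2: target = last just counts occurrences of last
theorem solveLoop_last (last k : Int) (l : List Int) (r : Int) (hr : 1 ≤ r) :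
    solveLoop last k l last r = decide (r ≤ (l.count last : Int)) := by
  induction l generalizing r with
  | nil => simp [solveLoop, List.count_nil]; omega
  | cons x xs ih =>
    simp only [solveLoop]
    by_cases hx : x = last
    · subst hx
      by_cases h1 : r - 1 = 0
      · simp [h1, List.count_cons_self]
        omega
      · rw [if_pos rfl, if_neg h1, ih (r - 1) (by omega)]
        simp [List.count_cons_self]
    · rw [if_neg hx, ih r hr, List.count_cons_of_ne (by simpa using hx)]

-- phase 1: target = first ≠ last skips to the suffix after the (k-1)-th first
theorem solveLoop_first (last k : Int) (l : List Int) (t r : Int)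
    (ht : t ≠ last) (hr : 1 ≤ r) :
    solveLoop last k l t r =
      (match afterNth t l (r - 1).toNat with
       | some v => solveLoop last k v last (k - 1)
       | none => false) := by
  induction l generalizing r with
  | nil => rfl
  | cons x xs ih =>
    simp only [solveLoop, afterNth]
    by_cases hx : x = t
    · by_cases h1 : r - 1 = 0
      · have : (r - 1).toNat = 0 := by omega
        simp [hx, h1, if_neg ht]
      · have hm : (r - 1).toNat = (r - 1 - 1).toNat + 1 := by omega
        rw [if_pos hx, if_neg h1, ih (r - 1) (by omega), if_pos hx, hm]
    · rw [if_neg hx, if_neg hx, ih r hr]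

-- all indices of `enumerate l s` are ≥ s, so a cutoff p < s counts every occurrence
theorem countP_enumerate_all (t2 p : Int) (l : List Int) (s : Int) (hp : p < s) :
    (PySem.List.enumerate l s).countP (fun ix => decide (ix.2 = t2 ∧ p < ix.1)) = l.count t2 := by
  induction l generalizing s with
  | nil => simp [PySem.List.enumerate_nil]
  | cons x xs ih =>
    rw [PySem.List.enumerate_cons, List.countP_cons, ih (s + 1) (by omega)]
    by_cases hx : x = t2
    · simp [hx, hp, List.count_cons_self]
    · simp [hx, List.count_cons_of_ne (by simpa using hx)]

-- KEY: the index table of `first` built from enumerate, versus afterNth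
theorem key (t t2 : Int) (l : List Int) (s : Int) (n : Nat) :
    (match afterNth t l n with
     | none =>
        ((PySem.List.enumerate l s).filterMap
          (fun ix => if ix.2 = t then some ix.1 else none)).length ≤ n
     | some v => ∃ p : Int,
        ((PySem.List.enumerate l s).filterMap
          (fun ix => if ix.2 = t then some ix.1 else none))[n]? = some p ∧
        s ≤ p ∧
        (PySem.List.enumerate l s).countP (fun ix => decide (ix.2 = t2 ∧ p < ix.1))
          = v.count t2) := by
  induction l generalizing s n with
  | nil => simp [afterNth, PySem.List.enumerate_nil]
  | cons x xs ih =>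
    rw [PySem.List.enumerate_cons]
    by_cases hx : x = t
    · match n with
      | 0 =>
        simp only [afterNth, if_pos hx]
        refine ⟨s, by simp [hx], le_refl s, ?_⟩
        rw [List.countP_cons, countP_enumerate_all t2 s xs (s + 1) (by omega)]
        simp
      | m + 1 =>
        simp only [afterNth, if_pos hx]
        have := ih (s + 1) m
        match hA : afterNth t xs m with
        | none =>
          rw [hA] at this
          simpa [hx] using this
        | some v =>
          rw [hA] at this
          obtain ⟨p, hget, hsp, hcnt⟩ := this
          refine ⟨p, by simp [hx, hget], by omega, ?_⟩
          rw [List.countP_cons, hcnt]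
          have : ¬ (x = t2 ∧ p < s) := by omega
          simp [this]
    · simp only [afterNth, if_neg hx]
      have := ih (s + 1) n
      match hA : afterNth t xs n with
      | none =>
        rw [hA] at this
        simpa [hx] using this
      | some v =>
        rw [hA] at this
        obtain ⟨p, hget, hsp, hcnt⟩ := this
        refine ⟨p, by simp [hx, hget], by omega, ?_⟩
        rw [List.countP_cons, hcnt]
        have : ¬ (x = t2 ∧ p < s) := by omega
        simp [this]

-- ===== VERDICT (by name: the statement is the Claim_ definition above) =====
theorem solve_spec : Claim_equal_solve := by
  intro a k _ _
  unfold Spec_solve solve solve_alt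
  by_cases hk1 : k = 1
  · simp [hk1]
  rw [if_neg hk1, if_neg hk1]
  match a with
  | [] => rfl
  | first :: rest =>
    match hL : rest.getLast? with
    | none => simp [hL]
    | some last =>
      simp only [hL]
      by_cases hfl : first = last
      · rw [if_pos hfl, if_pos hfl]
      rw [if_neg hfl, if_neg hfl]
      set mid := rest.dropLast with hmid
      by_cases hk2 : k < 2
      · rw [solveLoop_nonpos last k mid first (k - 1) (by omega)]
        simp [hk2]
      · -- k ≥ 2
        have hk : 2 ≤ k := by omega
        rw [solveLoop_first last k mid first (k - 1) hfl (by omega)]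
        have hn : (k - 1 - 1).toNat = (k - 2).toNat := by omega
        rw [hn]
        have hkey := key first last mid 0 (k - 2).toNat
        set fs := (PySem.List.enumerate mid 0).filterMap
          (fun ix => if ix.2 = first then some ix.1 else none) with hfs
        match hA : afterNth first mid (k - 2).toNat with
        | none =>
          rw [hA] at hkey
          have hlen : (fs.length : Int) < k - 1 := by omega
          simp [hlen]
        | some v =>
          rw [hA] at hkey
          obtain ⟨p, hget, _, hcnt⟩ := hkey
          obtain ⟨hlt, -⟩ := List.getElem?_eq_some_iff.mp hget
          have hguard : ¬ (k < 2 ∨ (fs.length : Int) < k - 1) := by omega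
          rw [if_neg hguard]
          rw [PySem.List.pyGet?_of_nonneg fs (show (0:Int) ≤ k - 2 by omega), hget]
          simp only [solveLoop_last last k v (k - 1) (by omega), hcnt]
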